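-- pv_equiv track=rewrite | github.com/FJN27/HMC | CS5/Lab8/hw8pr2.py | sum67
-- ===== SOURCE A (Python) =====
-- def sum67(nums):
--
--   sum = 0
--   condition = True
--
--   for num in nums:
--     if num == 6:
--       condition = False
--       continue     # the continue can be deleted
--
--     if num == 7 and condition == False:
--       condition = True
--       continue       # continue is needed because the num 7 is NOT added to sum
--
--     if condition == True:
--       sum = sum + num   # the num is added only if the boolean variable condition = True
--
--   return sum
-- ===== SOURCE B (Python) =====
-- def sum67(nums):
--     nums = list(nums)
--     while 6 in nums:
--         i = nums.index(6)
--         if 7 in nums[i+1:]: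
--             j = nums.index(7, i+1)
--             del nums[i:j+1]
--         else:
--             del nums[i:]
--     return sum(nums)
-- ===== Notes on version B (the rewrite author's own statement) =====
-- stated objective: alternative
-- what changed: Replaces A's single flag-driven pass with repeated location-and-deletion of each 6..7 segment from a copy of the list, followed by one plain sum of what remains.
import Mathlib
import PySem

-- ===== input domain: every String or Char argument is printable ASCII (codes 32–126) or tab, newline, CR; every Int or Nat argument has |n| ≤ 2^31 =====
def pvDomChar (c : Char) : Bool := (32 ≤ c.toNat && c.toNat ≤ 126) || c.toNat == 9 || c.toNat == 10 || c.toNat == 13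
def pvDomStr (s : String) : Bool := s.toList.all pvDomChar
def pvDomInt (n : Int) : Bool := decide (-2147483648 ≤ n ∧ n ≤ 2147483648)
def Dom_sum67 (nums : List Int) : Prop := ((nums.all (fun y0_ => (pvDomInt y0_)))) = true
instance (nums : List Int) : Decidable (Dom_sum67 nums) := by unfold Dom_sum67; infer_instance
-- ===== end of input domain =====

-- B replaces A's flag-driven single pass by repeatedly locating and deleting each 6..7 segment, then summing the remainder (alternative decomposition, not faster).


-- ===== PORT A =====
-- one step of A's for-loop: state (sum, condition)
def sum67Step (st : Int × Bool) (num : Int) : Int × Bool :=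
  if num == 6 then (st.1, false)
  else if num == 7 && st.2 == false then (st.1, true)
  else if st.2 == true then (st.1 + num, st.2)
  else st

def sum67 (nums : List Int) : Int :=
  (nums.foldl sum67Step (0, true)).1

-- ===== PORT B =====
-- B's while-loop: while 6 in nums, delete the segment from the first 6 to the
-- first 7 after it (or to the end if there is none); returns the residual list.
def sum67Del (nums : List Int) : List Int :=
  if h6 : 6 ∈ nums then
    let i := nums.idxOf 6
    let rest := nums.drop (i + 1)          -- nums[i+1:]
    if h7 : 7 ∈ rest then
      sum67Del (nums.take i ++ rest.drop (rest.idxOf 7 + 1))   -- del nums[i:j+1]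
    else
      nums.take i                           -- del nums[i:]
  else nums
termination_by nums.length
decreasing_by
  have hi : nums.idxOf 6 < nums.length := List.idxOf_lt_length_of_mem h6
  have hj : rest.idxOf 7 < rest.length := List.idxOf_lt_length_of_mem h7
  simp only [List.length_append, List.length_take, List.length_drop, rest] at *
  omega

def sum67_alt (nums : List Int) : Int :=
  (sum67Del nums).sum

-- ===== PRECONDITION & SPEC =====
def Spec_sum67 (nums : List Int) (out : Int) : Prop := out = sum67_alt nums
instance (nums : List Int) (out : Int) : Decidable (Spec_sum67 nums out) := by unfold Spec_sum67; infer_instance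

-- ===== CLAIM (what is proved, stated in full; the proofs are below) =====
def Claim_equal_sum67 : Prop := ∀ (nums : List Int), Dom_sum67 nums → Spec_sum67 nums (sum67 nums)

-- ===== LEMMAS AND PROOFS =====

-- in the True state with no 6 present, every element is added
theorem sum67_fold_true (l : List Int) (s : Int) (h : 6 ∉ l) :
    l.foldl sum67Step (s, true) = (s + l.sum, true) := by
  induction l generalizing s with
  | nil => simp
  | cons a t ih =>
    have ha : a ≠ 6 := fun hh => h (hh ▸ List.mem_cons_self)
    have ht : 6 ∉ t := fun hh => h (List.mem_cons_of_mem _ hh)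
    simp only [List.foldl_cons]
    have : sum67Step (s, true) a = (s + a, true) := by
      simp [sum67Step, ha]
    rw [this, ih _ ht]
    simp [List.sum_cons]; ring

-- in the False state with no 7 present, nothing changes
theorem sum67_fold_false_no7 (l : List Int) (s : Int) (h : 7 ∉ l) :
    l.foldl sum67Step (s, false) = (s, false) := by
  induction l generalizing s with
  | nil => simp
  | cons a t ih =>
    have ha : a ≠ 7 := fun hh => h (hh ▸ List.mem_cons_self)
    have ht : 7 ∉ t := fun hh => h (List.mem_cons_of_mem _ hh)
    simp only [List.foldl_cons]
    have : sum67Step (s, false) a = (s, false) := by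
      simp [sum67Step, ha]
    rw [this, ih _ ht]

-- in the False state, everything up to and including the first 7 is skipped
theorem sum67_fold_false_7 (l : List Int) (s : Int) (h : 7 ∈ l) :
    l.foldl sum67Step (s, false) =
      (l.drop (l.idxOf 7 + 1)).foldl sum67Step (s, true) := by
  induction l generalizing s with
  | nil => cases h
  | cons a t ih =>
    by_cases ha : a = 7
    · subst ha
      simp [List.foldl_cons, sum67Step, List.idxOf_cons_self]
    · have ht : 7 ∈ t := by
        rcases List.mem_cons.1 h with h1 | h1
        · exact absurd h1.symm ha
        · exact h1
      have hstep : sum67Step (s, false) a = (s, false) := by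
        simp [sum67Step, ha]
      have hidx : (a :: t).idxOf 7 = t.idxOf 7 + 1 := by
        simp [ha]
      simp only [List.foldl_cons, hstep, hidx]
      rw [ih _ ht]
      rw [List.drop_succ_cons]

-- decompose a list at the first occurrence of 6
theorem split_at_first_6 (l : List Int) (h : 6 ∈ l) :
    l = l.take (l.idxOf 6) ++ 6 :: l.drop (l.idxOf 6 + 1) ∧ 6 ∉ l.take (l.idxOf 6) := by
  have hi : l.idxOf 6 < l.length := List.idxOf_lt_length_of_mem h
  constructor
  · conv_lhs => rw [← List.take_append_drop (l.idxOf 6) l]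
    congr 1
    rw [List.drop_eq_getElem_cons hi, List.getElem_idxOf hi]
  · intro hmem
    have := (List.mem_take_iff_idxOf_lt h).1 hmem
    omega

theorem sum67_eq_alt (nums : List Int) : sum67 nums = sum67_alt nums := by
  induction nums using sum67Del.induct with
  | case1 nums h6 i rest h7 ih =>
    -- 6 present, and a 7 after it
    obtain ⟨hsplit, hno6⟩ := split_at_first_6 nums h6
    have h7' : 7 ∈ List.drop (List.idxOf 6 nums + 1) nums := h7
    have hi : i = List.idxOf 6 nums := rfl
    have hr : rest = List.drop (List.idxOf 6 nums + 1) nums := rfl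
    rw [hr, hi] at ih
    unfold sum67_alt at ih ⊢
    rw [sum67Del]
    simp only [dif_pos h6]
    rw [dif_pos h7', ← ih]
    unfold sum67
    conv_lhs => rw [hsplit]
    rw [List.foldl_append, sum67_fold_true _ 0 hno6, List.foldl_cons]
    have hstep : sum67Step (0 + (nums.take (nums.idxOf 6)).sum, true) 6 =
        (0 + (nums.take (nums.idxOf 6)).sum, false) := by simp [sum67Step]
    rw [hstep, sum67_fold_false_7 _ _ h7']
    conv_rhs => rw [List.foldl_append, sum67_fold_true _ 0 hno6]
  | case2 nums h6 i rest h7 =>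
    -- 6 present, no 7 after it
    obtain ⟨hsplit, hno6⟩ := split_at_first_6 nums h6
    have h7' : 7 ∉ List.drop (List.idxOf 6 nums + 1) nums := h7
    unfold sum67_alt
    rw [sum67Del]
    simp only [dif_pos h6]
    rw [dif_neg h7']
    unfold sum67
    conv_lhs => rw [hsplit]
    rw [List.foldl_append, sum67_fold_true _ 0 hno6, List.foldl_cons]
    have hstep : sum67Step (0 + (nums.take (nums.idxOf 6)).sum, true) 6 =
        (0 + (nums.take (nums.idxOf 6)).sum, false) := by simp [sum67Step]
    rw [hstep, sum67_fold_false_no7 _ _ h7']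
    simp
  | case3 nums h6 =>
    -- no 6 at all
    unfold sum67 sum67_alt
    rw [sum67Del]
    simp only [dif_neg h6]
    rw [sum67_fold_true _ 0 h6]
    simp

-- ===== VERDICT (by name: the statement is the Claim_ definition above) =====
theorem sum67_spec : Claim_equal_sum67 := by
  intro nums _
  unfold Spec_sum67
  exact sum67_eq_alt nums
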